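-- pv_equiv track=rewrite | github.com/berkeleynerd/safe | scripts/audit_docs_fixture_drift.py | normalize_target_path
-- ===== SOURCE A (Python) =====
-- def normalize_target_path(raw_target: str) -> str:
--     target = raw_target.strip("<>`'\" ,:;").rstrip(".")
--     while True:
--         if target.startswith("../"):
--             target = target[3:]
--             continue
--         if target.startswith("./"):
--             target = target[2:]
--             continue
--         return target
-- ===== SOURCE B (Python) =====
-- def normalize_target_path(raw_target: str) -> str:
--     target = raw_target.strip("<>`'\" ,:;").rstrip(".")
--     parts = target.split("/")
--     i = 0
--     while i < len(parts) - 1 and parts[i] in ("..", "."):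
--         i += 1
--     return "/".join(parts[i:])
-- ===== Notes on version B (the rewrite author's own statement) =====
-- stated objective: alternative
-- what changed: A's while loop that repeatedly tests for a leading parent- or current-directory prefix and re-slices the string is replaced by one split on the path separator, dropping the leading dot components while a later component exists, then one join.
import Mathlib
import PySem

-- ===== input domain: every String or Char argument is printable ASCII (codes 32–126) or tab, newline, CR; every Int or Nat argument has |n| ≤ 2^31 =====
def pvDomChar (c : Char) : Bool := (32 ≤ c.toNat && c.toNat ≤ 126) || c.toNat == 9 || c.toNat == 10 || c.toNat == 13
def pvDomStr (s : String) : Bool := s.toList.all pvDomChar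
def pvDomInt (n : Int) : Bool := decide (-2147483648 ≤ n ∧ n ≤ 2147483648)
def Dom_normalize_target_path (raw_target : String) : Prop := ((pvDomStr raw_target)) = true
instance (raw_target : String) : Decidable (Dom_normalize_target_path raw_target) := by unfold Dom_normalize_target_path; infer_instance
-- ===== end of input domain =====

-- B replaces A's repeated prefix-test-and-slice loop by one split on the path separator,
-- dropping the leading dot components, and one join (objective: alternative).

-- shared first line of both Pythons: raw_target.strip("<>`'\" ,:;").rstrip(".")
-- rstrip(".") is hand-ported (PySem has no chars-rstrip): dropping the trailing '.'
-- characters is exact for a one-character strip set.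
def pvCleanTarget (raw : String) : List Char :=
  ((PySem.Chars.stripChars raw.toList "<>`'\" ,:;".toList).reverse.dropWhile (· == '.')).reverse

-- ===== PORT A =====
-- the while-True loop of A, on the cleaned target; target[3:]/target[2:] with a
-- guaranteed prefix of that length is exactly List.drop
def pvLoopA (cs : List Char) : List Char :=
  if h1 : PySem.Chars.startswith cs ['.', '.', '/'] = true then
    pvLoopA (cs.drop 3)
  else if h2 : PySem.Chars.startswith cs ['.', '/'] = true then
    pvLoopA (cs.drop 2)
  else cs
termination_by cs.length
decreasing_by
  · have h := (PySem.Chars.startswith_iff _ _).mp h1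
    have := h.length_le
    simp at this ⊢
    omega
  · have h := (PySem.Chars.startswith_iff _ _).mp h2
    have := h.length_le
    simp at this ⊢
    omega

def normalize_target_path (raw_target : String) : String :=
  String.mk (pvLoopA (pvCleanTarget raw_target))

-- ===== PORT B =====
-- Source B's while loop over the split parts: skip leading dot components
-- as long as at least one more component follows.
def pvDropLead : List (List Char) → List (List Char)
  | p :: q :: rest =>
      if p = ['.', '.'] ∨ p = ['.'] then pvDropLead (q :: rest) else p :: q :: rest
  | l => l

def normalize_target_path_alt (raw_target : String) : String :=
  String.mk (PySem.Chars.join "/".toList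
    (pvDropLead (PySem.Chars.splitOn (pvCleanTarget raw_target) "/".toList)))

-- ===== PRECONDITION & SPEC =====
def Spec_normalize_target_path (raw_target : String) (out : String) : Prop := out = normalize_target_path_alt raw_target
instance (raw_target : String) (out : String) : Decidable (Spec_normalize_target_path raw_target out) := by unfold Spec_normalize_target_path; infer_instance

-- ===== CLAIM (what is proved, stated in full; the proofs are below) =====
def Claim_equal_normalize_target_path : Prop := ∀ (raw_target : String), Dom_normalize_target_path raw_target → Spec_normalize_target_path raw_target (normalize_target_path raw_target)

-- ===== LEMMAS AND PROOFS =====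

-- PySem's splitOn with the one-character separator "/" is Mathlib's List.splitOn
theorem pvGo_eq (fuel : ℕ) (l cur : List Char) (acc : List (List Char)) (h : l.length ≤ fuel) :
    PySem.Chars.splitOn.go ['/'] fuel l cur acc =
      acc.reverse ++ ((l.splitOnP (· == '/')).modifyHead (cur.reverse ++ ·)) := by
  induction fuel generalizing l cur acc with
  | zero =>
      have : l = [] := List.eq_nil_of_length_eq_zero (Nat.le_antisymm h (Nat.zero_le _))
      subst this
      simp [PySem.Chars.splitOn.go, List.splitOnP_nil]
  | succ fuel ih =>
      cases l with
      | nil => simp [PySem.Chars.splitOn.go, List.splitOnP_nil]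
      | cons c rest =>
          by_cases hc : c = '/'
          · subst hc
            have hpre : List.isPrefixOf ['/'] ('/' :: rest) = true := by simp [List.isPrefixOf]
            rw [show PySem.Chars.splitOn.go ['/'] (fuel + 1) ('/' :: rest) cur acc =
                  PySem.Chars.splitOn.go ['/'] fuel (List.drop 1 ('/' :: rest)) [] (cur.reverse :: acc) by
                simp [PySem.Chars.splitOn.go, hpre]]
            rw [ih _ _ _ (by simpa using Nat.le_of_succ_le_succ h)]
            have hne := List.splitOnP_ne_nil (p := fun x => x == '/') rest
            cases hsp : rest.splitOnP (· == '/') with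
            | nil => exact absurd hsp hne
            | cons a t => simp [List.splitOnP_cons, hsp]
          · have hpre : List.isPrefixOf ['/'] (c :: rest) = false := by
              simp [List.isPrefixOf]; exact fun hh => hc hh.symm
            rw [show PySem.Chars.splitOn.go ['/'] (fuel + 1) (c :: rest) cur acc =
                  PySem.Chars.splitOn.go ['/'] fuel rest (c :: cur) acc by
                simp [PySem.Chars.splitOn.go, hpre]]
            rw [ih _ _ _ (by simpa using Nat.le_of_succ_le_succ h)]
            have hne := List.splitOnP_ne_nil (p := fun x => x == '/') rest
            cases hsp : rest.splitOnP (· == '/') with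
            | nil => exact absurd hsp hne
            | cons a t => simp [List.splitOnP_cons, hsp, hc]

theorem pvSplitOn_bridge (cs : List Char) :
    PySem.Chars.splitOn cs ['/'] = cs.splitOn '/' := by
  unfold PySem.Chars.splitOn
  rw [pvGo_eq _ _ _ _ (by omega)]
  have hne := List.splitOnP_ne_nil (p := fun x => x == '/') cs
  cases hsp : cs.splitOnP (· == '/') with
  | nil => exact absurd hsp hne
  | cons a t => simp [List.splitOn, hsp]

theorem pvSplitOn_ne_nil (cs : List Char) : cs.splitOn '/' ≠ [] := by
  simpa [List.splitOn] using List.splitOnP_ne_nil (p := fun x => x == '/') cs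

theorem pvSplit_dotdot (t : List Char) :
    ('.' :: '.' :: '/' :: t).splitOn '/' = ['.', '.'] :: t.splitOn '/' := by
  have hne := List.splitOnP_ne_nil (p := fun x => x == '/') t
  cases hsp : t.splitOnP (· == '/') with
  | nil => exact absurd hsp hne
  | cons a l => simp [List.splitOn, List.splitOnP_cons, hsp]

theorem pvSplit_dot (t : List Char) :
    ('.' :: '/' :: t).splitOn '/' = ['.'] :: t.splitOn '/' := by
  have hne := List.splitOnP_ne_nil (p := fun x => x == '/') t
  cases hsp : t.splitOnP (· == '/') with
  | nil => exact absurd hsp hne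
  | cons a l => simp [List.splitOn, List.splitOnP_cons, hsp]

theorem pvKey (cs : List Char) :
    pvLoopA cs = PySem.Chars.join ['/'] (pvDropLead (cs.splitOn '/')) := by
  induction cs using pvLoopA.induct with
  | case1 cs h1 ih =>
      obtain ⟨u, hu⟩ := (PySem.Chars.startswith_iff _ _).mp h1
      have hcs : cs = '.' :: '.' :: '/' :: u := by rw [← hu]; rfl
      have hd : cs.drop 3 = u := by rw [hcs]; rfl
      rw [pvLoopA, dif_pos h1, ih, hd,
        show List.splitOn '/' cs = ['.', '.'] :: u.splitOn '/' by rw [hcs]; exact pvSplit_dotdot u]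
      cases hsp : u.splitOn '/' with
      | nil => exact absurd hsp (pvSplitOn_ne_nil u)
      | cons a l => simp [pvDropLead, hsp]
  | case2 cs h1 h2 ih =>
      obtain ⟨u, hu⟩ := (PySem.Chars.startswith_iff _ _).mp h2
      have hcs : cs = '.' :: '/' :: u := by rw [← hu]; rfl
      have hd : cs.drop 2 = u := by rw [hcs]; rfl
      rw [pvLoopA, dif_neg h1, dif_pos h2, ih, hd,
        show List.splitOn '/' cs = ['.'] :: u.splitOn '/' by rw [hcs]; exact pvSplit_dot u]
      cases hsp : u.splitOn '/' with
      | nil => exact absurd hsp (pvSplitOn_ne_nil u)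
      | cons a l => simp [pvDropLead, hsp]
  | case3 cs h1 h2 =>
      rw [pvLoopA, dif_neg h1, dif_neg h2]
      have hjoin : PySem.Chars.join ['/'] (cs.splitOn '/') = cs := by
        simpa [PySem.Chars.join] using List.intercalate_splitOn (x := '/') (xs := cs)
      have hdrop : pvDropLead (cs.splitOn '/') = cs.splitOn '/' := by
        cases hsp : cs.splitOn '/' with
        | nil => rfl
        | cons p l =>
            cases l with
            | nil => rfl
            | cons q rest =>
                have hcs : cs = p ++ '/' :: PySem.Chars.join ['/'] (q :: rest) := by
                  conv_lhs => rw [← hjoin]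
                  simp [hsp, PySem.Chars.join, List.intercalate]
                rw [pvDropLead, if_neg]
                rintro (hp | hp) <;> subst hp
                · exact h1 ((PySem.Chars.startswith_iff _ _).mpr (by rw [hcs]; exact ⟨_, rfl⟩))
                · exact h2 ((PySem.Chars.startswith_iff _ _).mpr (by rw [hcs]; exact ⟨_, rfl⟩))
      rw [hdrop, hjoin]

-- ===== VERDICT (by name: the statement is the Claim_ definition above) =====
theorem normalize_target_path_spec : Claim_equal_normalize_target_path := by
  intro raw_target _
  unfold Spec_normalize_target_path normalize_target_path normalize_target_path_alt
  rw [show "/".toList = ['/'] from rfl, pvSplitOn_bridge, pvKey]
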